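-- pv_equiv track=rewrite | github.com/zjacom/PS | BFS/problem9019.py | bfs
-- ===== SOURCE A (Python) =====
-- from collections import deque
--
-- def func_d(n):
--     return int(n * 2 % 10000)
--
-- def func_s(n):
--     if n == 0:
--         return 9999
--     else:
--         return n - 1
--
-- def func_l(n):
--     d1, e1 = n // 1000, n % 1000
--     d2, e2 = e1 // 100, e1 % 100
--     d3, d4 = e2 // 10, e2 % 10
--
--     return int((d2 * 1000) + (d3 * 100) + (d4 * 10) + d1)
--
-- def func_r(n):
--     d1, e1 = n // 1000, n % 1000
--     d2, e2 = e1 // 100, e1 % 100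
--     d3, d4 = e2 // 10, e2 % 10
--
--     return int((d4 * 1000) + (d1 * 100) + (d2 * 10) + d3)
--
-- def bfs(src, dst):
--     q = deque([(src, "")])
--     visited = [False] * 10000
--     visited[src] = True
--     while q:
--         s, p = q.popleft()
--         if s == dst:
--             return p
--         nd, ns, nl, nr = func_d(s), func_s(s), func_l(s), func_r(s)
--         if 0 <= nd < 10000 and not visited[nd]:
--             q.append((nd, p + "D"))
--             visited[nd] = True
--         if 0 <= ns < 10000 and not visited[ns]:
--             q.append((ns, p + "S"))
--             visited[ns] = True
--         if 0 <= nl < 10000 and not visited[nl]: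
--             q.append((nl, p + "L"))
--             visited[nl] = True
--         if 0 <= nr < 10000 and not visited[nr]:
--             q.append((nr, p + "R"))
--             visited[nr] = True
-- ===== SOURCE B (Python) =====
-- def bfs(src, dst):
--     # Same BFS order as A, but the queue holds bare states; the operation string is
--     # rebuilt at the end from parent/move tables instead of being carried per entry.
--     parent = [0] * 10000
--     move = [""] * 10000
--     visited = [False] * 10000
--     visited[src] = True
--     q = [src]
--     head = 0
--     while head < len(q):
--         s = q[head]
--         head += 1
--         if s == dst:
--             out = []
--             cur = dst
--             while cur != src:
--                 out.append(move[cur])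
--                 cur = parent[cur]
--             return "".join(reversed(out))
--         for n, c in ((s * 2 % 10000, "D"),
--                      (9999 if s == 0 else s - 1, "S"),
--                      (s % 1000 * 10 + s // 1000, "L"),
--                      (s % 10 * 1000 + s // 10, "R")):
--             if 0 <= n < 10000 and not visited[n]:
--                 visited[n] = True
--                 parent[n] = s
--                 move[n] = c
--                 q.append(n)
-- ===== Notes on version B (the rewrite author's own statement) =====
-- stated objective: alternative
-- what changed: The queue holds bare integer states instead of (state, path-string) pairs; per-entry path strings are replaced by parent[] and move[] tables filled at discovery time, and the answer is reconstructed once by walking parent pointers from dst back to src and reversing; the four D/S/L/R branches become one loop over a neighbour list with inline digit formulas.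
import Mathlib
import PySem

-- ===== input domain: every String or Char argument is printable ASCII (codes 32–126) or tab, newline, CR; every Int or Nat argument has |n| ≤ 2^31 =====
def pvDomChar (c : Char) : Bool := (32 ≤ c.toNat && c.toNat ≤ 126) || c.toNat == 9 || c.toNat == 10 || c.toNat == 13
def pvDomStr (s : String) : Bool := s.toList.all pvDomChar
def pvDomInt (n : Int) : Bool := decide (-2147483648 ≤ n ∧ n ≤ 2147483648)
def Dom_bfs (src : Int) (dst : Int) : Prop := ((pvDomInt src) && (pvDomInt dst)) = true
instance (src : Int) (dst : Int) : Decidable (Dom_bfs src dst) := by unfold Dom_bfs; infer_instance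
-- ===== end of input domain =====

-- B replaces A's per-queue-entry path strings by parent/move tables and one backward
-- reconstruction pass (queue of bare states); equivalence of the RETURN value is proved
-- for every input on which Python A returns a string (Pre_bfs).

-- ===== PORT A =====
def func_d (n : Int) : Int := PySem.Int.mod (n * 2) 10000

def func_s (n : Int) : Int := if n = 0 then 9999 else n - 1

def func_l (n : Int) : Int :=
  let d1 := PySem.Int.floordiv n 1000
  let e1 := PySem.Int.mod n 1000
  let d2 := PySem.Int.floordiv e1 100
  let e2 := PySem.Int.mod e1 100
  let d3 := PySem.Int.floordiv e2 10
  let d4 := PySem.Int.mod e2 10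
  d2 * 1000 + d3 * 100 + d4 * 10 + d1

def func_r (n : Int) : Int :=
  let d1 := PySem.Int.floordiv n 1000
  let e1 := PySem.Int.mod n 1000
  let d2 := PySem.Int.floordiv e1 100
  let e2 := PySem.Int.mod e1 100
  let d3 := PySem.Int.floordiv e2 10
  let d4 := PySem.Int.mod e2 10
  d4 * 1000 + d1 * 100 + d2 * 10 + d3

-- Python list assignment `l[i] = True` with a possibly negative index (wraps once);
-- where Python raises IndexError (|i| beyond range, excluded by Pre_bfs) this is a no-op.
def pyListSet (l : Array Bool) (i : Int) : Array Bool :=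
  (l.setIfInBounds (if i < 0 then i + l.size else i).toNat true)

-- one `if 0 <= nX < 10000 and not visited[nX]:` block of A: append (state, path+letter), mark visited
def branchA (n : Int) (c : String) (p : String) (st : List (Int × String) × Array Bool) :
    List (Int × String) × Array Bool :=
  if 0 ≤ n ∧ n < 10000 ∧ ¬(st.2.getD n.toNat false = true) then
    (st.1 ++ [(n, p ++ c)], st.2.setIfInBounds n.toNat true)
  else st

def loopA (dst : Int) : Nat → List (Int × String) → Array Bool → String
  | 0, _, _ => ""  -- fuel guard only; 20001 ≥ the ≤ 10001 possible iterations
  | fuel + 1, q, vis =>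
    match q with
    | [] => ""  -- Python A falls off the loop and returns None here; Pre_bfs excludes these inputs
    | (s, p) :: rest =>
      if s = dst then p
      else
        let nd := func_d s
        let ns := func_s s
        let nl := func_l s
        let nr := func_r s
        let st := branchA nr "R" p (branchA nl "L" p (branchA ns "S" p (branchA nd "D" p (rest, vis))))
        loopA dst fuel st.1 st.2

def bfs (src : Int) (dst : Int) : String :=
  loopA dst 20001 [(src, "")] (pyListSet (Array.replicate 10000 false) src)

-- ===== PORT B =====
-- one iteration of B's `for n, c in (...)` body: mark visited, record parent and move, enqueue
def stepB (s : Int) (st : List Int × Array Bool × Array Int × Array String) (nc : Int × String) :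
    List Int × Array Bool × Array Int × Array String :=
  match st, nc with
  | (q, vis, par, mov), (n, c) =>
    if 0 ≤ n ∧ n < 10000 ∧ ¬(vis.getD n.toNat false = true) then
      (q ++ [n], vis.setIfInBounds n.toNat true, par.setIfInBounds n.toNat s, mov.setIfInBounds n.toNat c)
    else (q, vis, par, mov)

-- B's `while cur != src` reconstruction walk (fuel 10000 covers any parent chain: < 10000 marked states)
def walkB (src : Int) (par : Array Int) (mov : Array String) : Nat → Int → List String → List String
  | 0, _, out => out
  | fuel + 1, cur, out =>
    if cur = src then out
    else walkB src par mov fuel (par.getD cur.toNat 0) (out ++ [mov.getD cur.toNat ""])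

def loopB (src dst : Int) : Nat → List Int → Array Bool → Array Int → Array String → String
  | 0, _, _, _, _ => ""  -- fuel guard only, as in loopA
  | fuel + 1, q, vis, par, mov =>
    match q with
    | [] => ""  -- Python B falls off the loop and returns None here; Pre_bfs excludes these inputs
    | s :: rest =>
      if s = dst then String.join ((walkB src par mov 10000 dst []).reverse)
      else
        let st := [(PySem.Int.mod (s * 2) 10000, "D"),
                   (if s = 0 then 9999 else s - 1, "S"),
                   (PySem.Int.mod s 1000 * 10 + PySem.Int.floordiv s 1000, "L"),
                   (PySem.Int.mod s 10 * 1000 + PySem.Int.floordiv s 10, "R")].foldl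
                    (stepB s) (rest, vis, par, mov)
        loopB src dst fuel st.1 st.2.1 st.2.2.1 st.2.2.2

def bfs_alt (src : Int) (dst : Int) : String :=
  loopB src dst 20001 [src] (pyListSet (Array.replicate 10000 false) src)
    (Array.replicate 10000 0) (Array.replicate 10000 "")

-- ===== PRECONDITION & SPEC =====
-- Exactly the inputs on which Python A returns a string: src outside -10000..9999 raises
-- IndexError at `visited[src] = True`; and when dst is never popped (dst outside 0..9999 and
-- ≠ src; for negative src, dst = src + 10000, whose visited cell is pre-marked by the
-- wrapped initial assignment; for src = -10000 every dst ≠ src, since its one in-range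
-- neighbour 0 is pre-marked) the loop exhausts the queue and A returns None (not a string).
def Pre_bfs (src : Int) (dst : Int) : Prop :=
  (0 ≤ src ∧ src ≤ 9999 ∧ 0 ≤ dst ∧ dst ≤ 9999) ∨
  (-10000 ≤ src ∧ src < 0 ∧ (dst = src ∨ (src ≠ -10000 ∧ 0 ≤ dst ∧ dst ≤ 9999 ∧ dst ≠ src + 10000)))
instance (src : Int) (dst : Int) : Decidable (Pre_bfs src dst) := by unfold Pre_bfs; infer_instance

def pvWitness_bfs : Int × Int := (1234, 3412)

def Spec_bfs (src : Int) (dst : Int) (out : String) : Prop := out = bfs_alt src dst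
instance (src : Int) (dst : Int) (out : String) : Decidable (Spec_bfs src dst out) := by unfold Spec_bfs; infer_instance

-- ===== CLAIM (what is proved, stated in full; the proofs are below) =====
def Claim_equal_bfs : Prop := ∀ (src : Int) (dst : Int), Dom_bfs src dst → Pre_bfs src dst → Spec_bfs src dst (bfs src dst)

-- ===== LEMMAS AND PROOFS =====

-- (cur = s) `ms` is the list of move letters read off the parent chain from s back to src;
-- every non-src node on it is a marked in-range state
def Chain (src : Int) (vis : List Bool) (par : List Int) (mov : List String) : Int → List String → Prop
  | s, [] => s = src
  | s, m :: rest => s ≠ src ∧ 0 ≤ s ∧ s < 10000 ∧ vis.getD s.toNat false = true ∧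
      mov.getD s.toNat "" = m ∧ Chain src vis par mov (par.getD s.toNat 0) rest

-- an A-queue entry (s, p) is explained by the B tables
def EntOk (src : Int) (vis : List Bool) (par : List Int) (mov : List String) (s : Int) (p : String) : Prop :=
  ∃ ms, Chain src vis par mov s ms ∧ p = String.join ms.reverse ∧ ms.length ≤ vis.count true

def LoopInv (src : Int) (vis : Array Bool) (par : Array Int) (mov : Array String) (qA : List (Int × String)) : Prop :=
  vis.toList.length = 10000 ∧ par.toList.length = 10000 ∧ mov.toList.length = 10000 ∧
  (0 ≤ src → src < 10000 → vis.toList.getD src.toNat false = true) ∧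
  (∀ s p, (s, p) ∈ qA → EntOk src vis.toList par.toList mov.toList s p)

-- bridges between the ports' Array state and the List-level lemmas
theorem arr_getD {α : Type} (a : Array α) (i : Nat) (d : α) : a.getD i d = a.toList.getD i d := by
  by_cases h : i < a.size
  · simp [Array.getD, List.getD, h]
  · simp [Array.getD, List.getD, h]

theorem arr_set {α : Type} (a : Array α) (i : Nat) (v : α) :
    (a.setIfInBounds i v).toList = a.toList.set i v := by
  simp

theorem getD_set_eq {α : Type} (l : List α) (i : Nat) (v d : α) (h : i < l.length) :
    (l.set i v).getD i d = v := by
  simp [List.getD, h]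

theorem getD_set_ne {α : Type} (l : List α) (i j : Nat) (v d : α) (h : i ≠ j) :
    (l.set i v).getD j d = l.getD j d := by
  simp [List.getD, List.getElem?_set_ne h]

theorem join_snoc (l : List String) (x : String) : String.join (l ++ [x]) = String.join l ++ x := by
  simp [String.join]

theorem count_set_true (l : List Bool) : ∀ (i : Nat), i < l.length → l.getD i false = false →
    (l.set i true).count true = l.count true + 1 := by
  induction l with
  | nil => intro i h; simp at h
  | cons a t ih =>
    intro i hi hv
    cases i with
    | zero => simp [List.getD] at hv; subst hv; simp
    | succ j =>
      simp [List.getD] at hv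
      simp only [List.set, List.count_cons]
      rw [ih j (by simpa using hi) (by simpa [List.getD] using hv)]
      omega

theorem chain_fresh (src n x : Int) (c0 : String) (vis : List Bool) (par : List Int)
    (mov : List String) (hn : vis.getD n.toNat false = false) :
    ∀ (ms : List String) (s : Int), Chain src vis par mov s ms →
      Chain src (vis.set n.toNat true) (par.set n.toNat x) (mov.set n.toNat c0) s ms := by
  intro ms
  induction ms with
  | nil => intro s h; exact h
  | cons m rest ih =>
    intro s h
    obtain ⟨h1, h2, h3, h4, h5, h6⟩ := h
    have hne : n.toNat ≠ s.toNat := by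
      intro e; rw [e] at hn; rw [hn] at h4; exact Bool.false_ne_true h4
    exact ⟨h1, h2, h3,
      by rw [getD_set_ne _ _ _ _ _ hne]; exact h4,
      by rw [getD_set_ne _ _ _ _ _ hne]; exact h5,
      by rw [getD_set_ne _ _ _ _ _ hne]; exact ih _ h6⟩

theorem entOk_fresh (src n x : Int) (c0 : String) (vis : List Bool) (par : List Int)
    (mov : List String) (s : Int) (p : String)
    (hlen : vis.length = 10000) (hn0 : 0 ≤ n) (hn1 : n < 10000)
    (hn : vis.getD n.toNat false = false) (h : EntOk src vis par mov s p) :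
    EntOk src (vis.set n.toNat true) (par.set n.toNat x) (mov.set n.toNat c0) s p := by
  obtain ⟨ms, hc, hp, hl⟩ := h
  refine ⟨ms, chain_fresh src n x c0 vis par mov hn ms s hc, hp, ?_⟩
  rw [count_set_true vis n.toNat (by omega) hn]
  omega

theorem step_sim (src s n : Int) (c p : String) (qA : List (Int × String)) (vis : Array Bool)
    (par : Array Int) (mov : Array String)
    (hInv : LoopInv src vis par mov qA) (hs : EntOk src vis.toList par.toList mov.toList s p) :
    ∃ par' mov',
      stepB s (qA.map Prod.fst, vis, par, mov) (n, c)
        = ((branchA n c p (qA, vis)).1.map Prod.fst, (branchA n c p (qA, vis)).2, par', mov')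
      ∧ LoopInv src (branchA n c p (qA, vis)).2 par' mov' (branchA n c p (qA, vis)).1
      ∧ EntOk src (branchA n c p (qA, vis)).2.toList par'.toList mov'.toList s p := by
  obtain ⟨hv, hpar, hmov, hsrc, hent⟩ := hInv
  by_cases g : 0 ≤ n ∧ n < 10000 ∧ ¬(vis.getD n.toNat false = true)
  · obtain ⟨g1, g2, g3⟩ := g
    have hnf : vis.toList.getD n.toNat false = false := by
      rw [← arr_getD]
      cases hvn : vis.getD n.toNat false with
      | false => rfl
      | true => exact absurd hvn g3
    refine ⟨par.setIfInBounds n.toNat s, mov.setIfInBounds n.toNat c, ?_, ?_, ?_⟩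
    · simp only [stepB, branchA, if_pos (⟨g1, g2, g3⟩ : 0 ≤ n ∧ n < 10000 ∧ ¬(vis.getD n.toNat false = true))]
      simp
    · simp only [branchA, if_pos (⟨g1, g2, g3⟩ : 0 ≤ n ∧ n < 10000 ∧ ¬(vis.getD n.toNat false = true))]
      refine ⟨?_, ?_, ?_, ?_, ?_⟩
      · rw [arr_set, List.length_set]; exact hv
      · rw [arr_set, List.length_set]; exact hpar
      · rw [arr_set, List.length_set]; exact hmov
      · intro hs0 hs1
        rw [arr_set]
        by_cases e : n.toNat = src.toNat
        · rw [e, getD_set_eq _ _ _ _ (by omega)]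
        · rw [getD_set_ne _ _ _ _ _ e]; exact hsrc hs0 hs1
      · intro t q hmem
        rw [arr_set, arr_set, arr_set]
        rcases List.mem_append.1 hmem with hold | hnew
        · exact entOk_fresh src n s c vis.toList par.toList mov.toList t q hv g1 g2 hnf
            (hent t q hold)
        · simp only [List.mem_singleton] at hnew
          obtain ⟨e1, e2⟩ : t = n ∧ q = p ++ c := by injection hnew with a b; exact ⟨a, b⟩
          rw [e1, e2]
          obtain ⟨ms, hc, hp, hl⟩ := hs
          refine ⟨c :: ms, ?_, ?_, ?_⟩
          · have hne_src : n ≠ src := by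
              intro e
              by_cases hs0 : 0 ≤ src
              · have h10 : src < 10000 := by omega
                rw [e, hsrc hs0 h10] at hnf
                exact Bool.noConfusion hnf
              · omega
            refine ⟨hne_src, g1, g2, getD_set_eq _ _ _ _ (by omega), ?_, ?_⟩
            · exact getD_set_eq _ _ _ _ (by omega)
            · rw [getD_set_eq _ _ _ _ (by omega)]
              exact chain_fresh src n s c vis.toList par.toList mov.toList hnf ms s hc
          · rw [List.reverse_cons, join_snoc, ← hp]
          · rw [count_set_true vis.toList n.toNat (by omega) hnf]
            simpa using Nat.succ_le_succ hl
    · simp only [branchA, if_pos (⟨g1, g2, g3⟩ : 0 ≤ n ∧ n < 10000 ∧ ¬(vis.getD n.toNat false = true))]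
      rw [arr_set, arr_set, arr_set]
      exact entOk_fresh src n s c vis.toList par.toList mov.toList s p hv g1 g2 hnf hs
  · refine ⟨par, mov, ?_, ?_, ?_⟩
    · simp only [stepB, branchA, if_neg g]
    · simp only [branchA, if_neg g]
      exact ⟨hv, hpar, hmov, hsrc, hent⟩
    · simp only [branchA, if_neg g]
      exact hs

theorem walk_eq (src : Int) (visL : List Bool) (par : Array Int) (mov : Array String) :
    ∀ (ms : List String) (s : Int) (fuel : Nat) (acc : List String),
      Chain src visL par.toList mov.toList s ms → ms.length ≤ fuel →
      walkB src par mov fuel s acc = acc ++ ms := by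
  intro ms
  induction ms with
  | nil =>
    intro s fuel acc hc _
    have : s = src := hc
    subst this
    cases fuel with
    | zero => simp [walkB]
    | succ f => simp [walkB]
  | cons m rest ih =>
    intro s fuel acc hc hlen
    obtain ⟨h1, _, _, _, h5, h6⟩ := hc
    cases fuel with
    | zero => simp at hlen
    | succ f =>
      simp only [walkB, if_neg h1]
      rw [arr_getD mov s.toNat "", arr_getD par s.toNat 0, h5,
        ih _ f _ h6 (by simpa using hlen)]
      simp

theorem func_l_eq (s : Int) :
    func_l s = PySem.Int.mod s 1000 * 10 + PySem.Int.floordiv s 1000 := by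
  simp only [func_l,
    PySem.Int.floordiv_eq_ediv_of_pos (by norm_num : (0:Int) < 1000),
    PySem.Int.floordiv_eq_ediv_of_pos (by norm_num : (0:Int) < 100),
    PySem.Int.floordiv_eq_ediv_of_pos (by norm_num : (0:Int) < 10),
    PySem.Int.mod_eq_emod_of_pos (by norm_num : (0:Int) < 1000),
    PySem.Int.mod_eq_emod_of_pos (by norm_num : (0:Int) < 100),
    PySem.Int.mod_eq_emod_of_pos (by norm_num : (0:Int) < 10)]
  omega

theorem func_r_eq (s : Int) :
    func_r s = PySem.Int.mod s 10 * 1000 + PySem.Int.floordiv s 10 := by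
  simp only [func_r,
    PySem.Int.floordiv_eq_ediv_of_pos (by norm_num : (0:Int) < 1000),
    PySem.Int.floordiv_eq_ediv_of_pos (by norm_num : (0:Int) < 100),
    PySem.Int.floordiv_eq_ediv_of_pos (by norm_num : (0:Int) < 10),
    PySem.Int.mod_eq_emod_of_pos (by norm_num : (0:Int) < 1000),
    PySem.Int.mod_eq_emod_of_pos (by norm_num : (0:Int) < 100),
    PySem.Int.mod_eq_emod_of_pos (by norm_num : (0:Int) < 10)]
  omega

theorem loop_sim (src dst : Int) :
    ∀ (fuel : Nat) (qA : List (Int × String)) (vis : Array Bool) (par : Array Int)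
      (mov : Array String), LoopInv src vis par mov qA →
      loopA dst fuel qA vis = loopB src dst fuel (qA.map Prod.fst) vis par mov := by
  intro fuel
  induction fuel with
  | zero => intro qA vis par mov _; simp [loopA, loopB]
  | succ f ih =>
    intro qA vis par mov hInv
    match qA with
    | [] => simp [loopA, loopB]
    | (s, p) :: rest =>
      simp only [List.map_cons, loopA, loopB]
      by_cases hd : s = dst
      · simp only [if_pos hd]
        obtain ⟨hv, _, _, _, hent⟩ := hInv
        obtain ⟨ms, hc, hp, hl⟩ := hent s p (by simp)
        have hcl : vis.toList.count true ≤ 10000 := hv ▸ List.count_le_length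
        rw [← hd, walk_eq src vis.toList par mov ms s 10000 [] hc (by omega)]
        simpa using hp
      · simp only [if_neg hd]
        have hInvRest : LoopInv src vis par mov rest := by
          obtain ⟨hv, hpar, hmov, hsrc, hent⟩ := hInv
          exact ⟨hv, hpar, hmov, hsrc, fun t q hm => hent t q (by simp [hm])⟩
        have hsEnt : EntOk src vis.toList par.toList mov.toList s p :=
          (hInv.2.2.2.2) s p (by simp)
        rw [← func_l_eq s, ← func_r_eq s]
        simp only [List.foldl]
        obtain ⟨par1, mov1, e1, inv1, ent1⟩ :=
          step_sim src s (func_d s) "D" p rest vis par mov hInvRest hsEnt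
        rw [show stepB s (rest.map Prod.fst, vis, par, mov) (PySem.Int.mod (s * 2) 10000, "D")
              = stepB s (rest.map Prod.fst, vis, par, mov) (func_d s, "D") from rfl, e1]
        obtain ⟨par2, mov2, e2, inv2, ent2⟩ :=
          step_sim src s (func_s s) "S" p _ _ par1 mov1 inv1 ent1
        rw [show (if s = 0 then (9999:Int) else s - 1) = func_s s from rfl, e2]
        obtain ⟨par3, mov3, e3, inv3, ent3⟩ :=
          step_sim src s (func_l s) "L" p _ _ par2 mov2 inv2 ent2
        rw [e3]
        obtain ⟨par4, mov4, e4, inv4, _⟩ :=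
          step_sim src s (func_r s) "R" p _ _ par3 mov3 inv3 ent3
        rw [e4]
        exact ih _ _ _ _ inv4

theorem inv_init (src : Int) :
    LoopInv src (pyListSet (Array.replicate 10000 false) src) (Array.replicate 10000 0)
      (Array.replicate 10000 "") [(src, "")] := by
  have hset : (pyListSet (Array.replicate 10000 false) src).toList
      = (List.replicate 10000 false).set (if src < 0 then src + ((10000 : Nat) : Int) else src).toNat true := by
    unfold pyListSet
    rw [Array.toList_setIfInBounds, Array.toList_replicate, Array.size_replicate]
  refine ⟨?_, ?_, ?_, ?_, ?_⟩
  · rw [hset, List.length_set, List.length_replicate]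
  · rw [Array.toList_replicate, List.length_replicate]
  · rw [Array.toList_replicate, List.length_replicate]
  · intro h0 h1
    have hns : ¬ src < 0 := by omega
    rw [hset, if_neg hns]
    exact getD_set_eq _ _ _ _ (by rw [List.length_replicate]; omega)
  · intro t q hm
    simp only [List.mem_singleton] at hm
    obtain ⟨e1, e2⟩ : t = src ∧ q = "" := by injection hm with a b; exact ⟨a, b⟩
    rw [e1, e2]
    exact ⟨[], rfl, rfl, Nat.zero_le _⟩

-- ===== VERDICT (by name: the statement is the Claim_ definition above) =====
theorem bfs_spec : Claim_equal_bfs := by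
  intro src dst _ _
  unfold Spec_bfs bfs bfs_alt
  exact loop_sim src dst 20001 [(src, "")]
    (pyListSet (Array.replicate 10000 false) src) (Array.replicate 10000 0)
    (Array.replicate 10000 "") (inv_init src)
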